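-- pv_equiv track=rewrite | github.com/Abib-ops/Abib | Abib.py | repeat_find_keyinc
-- ===== SOURCE A (Python) =====
-- def punctuation_counter(text: str) -> int:
--     """Count the number of punctuation characters in text."""
--
--     p = "()[];:!<>,.-?"  # ’ not needed because in the search file.
--     num: int = 0
--     for _ in p:
--         k = text.count(_)
--         num += k
--
--     return num
--
-- def repeat_find_keyinc(rx: str, start: int, end: int) -> int:
--     """Repeat find of lengthening text.
--
--     rx is the verse from the PCE-find.txt file
--     or a similar file without italics."""
--
--     numb: int
--     sumb = 0
--     while True:
--         text: str = rx[start:end]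
--         numb = punctuation_counter(text)
--         sumb += numb
--         if numb == 0:
--             break
--         start = end
--         end += numb
--
--     return sumb
-- ===== SOURCE B (Python) =====
-- def repeat_find_keyinc(rx: str, start: int, end: int) -> int:
--     """Same walk as the original, but each window's punctuation count is a
--     prefix-sum difference (O(1)) instead of slicing and re-scanning the text."""
--     p = "()[];:!<>,.-?"
--     n = len(rx)
--     pre = [0]
--     acc = 0
--     for ch in rx:
--         if ch in p:
--             acc += 1
--         pre.append(acc)
--
--     def clamp(i):
--         if i < 0:
--             i += n
--         return 0 if i < 0 else (n if i > n else i)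
--
--     sumb = 0
--     while True:
--         numb = pre[clamp(end)] - pre[clamp(start)]
--         if numb <= 0:
--             break
--         sumb += numb
--         start = end
--         end += numb
--     return sumb
-- ===== Notes on version B (the rewrite author's own statement) =====
-- stated objective: faster
-- what changed: A re-slices the string and re-scans each window with 13 str.count passes per iteration; B builds one prefix-count array of punctuation in a single pass and obtains each window's count as a clamped prefix-sum difference in O(1).
import Mathlib
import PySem

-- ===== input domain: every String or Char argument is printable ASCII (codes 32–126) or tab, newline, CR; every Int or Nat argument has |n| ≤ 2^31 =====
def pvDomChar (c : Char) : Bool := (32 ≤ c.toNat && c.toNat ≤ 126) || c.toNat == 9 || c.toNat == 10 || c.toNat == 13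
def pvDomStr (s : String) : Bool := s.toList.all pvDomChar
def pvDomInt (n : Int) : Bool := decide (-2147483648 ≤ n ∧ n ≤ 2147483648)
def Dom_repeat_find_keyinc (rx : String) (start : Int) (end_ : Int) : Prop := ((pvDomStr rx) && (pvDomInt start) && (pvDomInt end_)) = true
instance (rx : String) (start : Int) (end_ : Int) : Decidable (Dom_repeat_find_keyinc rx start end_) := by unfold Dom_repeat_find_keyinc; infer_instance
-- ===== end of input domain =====

-- B replaces A's per-window slicing + 13 per-window count scans by one prefix-count array
-- queried via clamped prefix-sum differences (objective: faster).


-- ===== PORT A =====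
def punctuation_counter (text : String) : Int :=
  "()[];:!<>,.-?".toList.foldl (fun num c => num + (PySem.Str.count text (String.ofList [c]) : Int)) 0

-- lemma cited (via keyA) by repeatA_loop's decreasing_by: an empty window counts 0
theorem punctcount_nil (s : String) (h : s.toList = []) : punctuation_counter s = 0 := by
  have hc : ∀ c : Char, PySem.Chars.count s.toList [c] = 0 := by
    intro c
    rw [h]
    rfl
  simp [punctuation_counter, PySem.Str.count_eq, hc]

-- lemma cited by repeatA_loop's decreasing_by: a window with nonzero count has clampIdx start < clampIdx end
theorem keyA (rx : String) (a b : Int)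
    (h : punctuation_counter (PySem.Str.slice rx (some a) (some b)) ≠ 0) :
    PySem.List.clampIdx rx.toList.length a < PySem.List.clampIdx rx.toList.length b := by
  by_contra hnc
  rw [not_lt] at hnc
  apply h
  apply punctcount_nil
  rw [PySem.Str.toList_slice]
  have hl : (PySem.Chars.slice rx.toList (some a) (some b)).length = 0 := by
    rw [show PySem.Chars.slice rx.toList (some a) (some b)
          = PySem.List.slice rx.toList (some a) (some b) from rfl,
        PySem.List.length_slice]
    omega
  exact List.length_eq_zero_iff.mp hl

-- the while-loop of A: state (start, end, sumb)
def repeatA_loop (rx : String) (start end_ sumb : Int) : Int :=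
  let text := PySem.Str.slice rx (some start) (some end_)
  let numb := punctuation_counter text
  if numb = 0 then sumb + numb
  else repeatA_loop rx end_ (end_ + numb) (sumb + numb)
termination_by rx.toList.length + 1 - PySem.List.clampIdx rx.toList.length start
decreasing_by
  have h1 := keyA rx start end_ (by assumption)
  have h2 := PySem.List.clampIdx_le rx.toList.length end_
  omega

def repeat_find_keyinc (rx : String) (start : Int) (end_ : Int) : Int :=
  repeatA_loop rx start end_ 0

-- ===== PORT B =====
-- B's clamp(i): Python slice-bound clamping
def clampB (n : Nat) (i : Int) : Nat :=
  let j := if i < 0 then i + n else i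
  if j < 0 then 0 else if (n : Int) < j then n else j.toNat

-- cited by altLoop's decreasing_by
theorem clampB_of_ge (n : Nat) (i : Int) (h : (n : Int) ≤ i) : clampB n i = n := by
  unfold clampB; dsimp only; split_ifs <;> omega

-- B's prefix array: pre[i] = number of punctuation chars in rx[:i]
def altPre (rx : String) : List Int :=
  (rx.toList.foldl (fun (st : List Int × Int) ch =>
    let acc := if ("()[];:!<>,.-?".toList).contains ch then st.2 + 1 else st.2
    (st.1 ++ [acc], acc)) ([0], 0)).1

-- the measure argument cited by altLoop's decreasing_by
theorem decArith (n : Nat) (end_ d : Int) (cS cE : Nat)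
    (hd : 0 < d)
    (hEn : (n : Int) ≤ end_ → cE = n)
    (hcc : cS = cE → d = 0) :
    2 * (((n : Int) - (end_ + d)).toNat) + (if cE = n then 0 else 1)
      < 2 * (((n : Int) - end_).toNat) + (if cS = n then 0 else 1) := by
  by_cases hge : (n : Int) ≤ end_
  · have hE := hEn hge
    have hS : cS ≠ n := fun h => absurd (hcc (h.trans hE.symm)) (by omega)
    rw [if_pos hE, if_neg hS]
    omega
  · split_ifs <;> omega

-- B's while-loop: window count = pre[clamp(end)] - pre[clamp(start)]
def altLoop (pre : List Int) (n : Nat) (start end_ sumb : Int) : Int :=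
  let numb := pre.getD (clampB n end_) 0 - pre.getD (clampB n start) 0
  if numb ≤ 0 then sumb
  else altLoop pre n end_ (end_ + numb) (sumb + numb)
termination_by 2 * (((n : Int) - end_).toNat) + (if clampB n start = n then 0 else 1)
decreasing_by
  exact decArith n end_ _ (clampB n start) (clampB n end_)
    (Int.not_le.mp (by assumption))
    (clampB_of_ge n end_)
    (fun h => by rw [h]; exact sub_self _)

def repeat_find_keyinc_alt (rx : String) (start : Int) (end_ : Int) : Int :=
  let n := (PySem.Str.len rx).toNat
  altLoop (altPre rx) n start end_ 0

-- ===== PRECONDITION & SPEC =====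
def Spec_repeat_find_keyinc (rx : String) (start : Int) (end_ : Int) (out : Int) : Prop := out = repeat_find_keyinc_alt rx start end_
instance (rx : String) (start : Int) (end_ : Int) (out : Int) : Decidable (Spec_repeat_find_keyinc rx start end_ out) := by unfold Spec_repeat_find_keyinc; infer_instance

-- ===== CLAIM (what is proved, stated in full; the proofs are below) =====
def Claim_equal_repeat_find_keyinc : Prop := ∀ (rx : String) (start : Int) (end_ : Int), Dom_repeat_find_keyinc rx start end_ → Spec_repeat_find_keyinc rx start end_ (repeat_find_keyinc rx start end_)

-- ===== LEMMAS AND PROOFS =====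

-- the punctuation predicate and the prefix counter
def pP (c : Char) : Bool := ("()[];:!<>,.-?".toList).contains c
def cnt (l : List Char) (i : Nat) : Int := ((l.take i).countP pP : Int)

theorem go_cons (c h : Char) (t : List Char) (f acc : Nat) :
    PySem.Chars.count.go [c] (f+1) (h::t) acc =
      if [c].isPrefixOf (h::t) then PySem.Chars.count.go [c] f t (acc+1)
      else PySem.Chars.count.go [c] f t acc := rfl

theorem count_go_singleton (c : Char) : ∀ (l : List Char) (fuel acc : Nat), l.length ≤ fuel →
    PySem.Chars.count.go [c] fuel l acc = acc + l.count c := by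
  intro l
  induction l with
  | nil =>
    intro fuel acc _
    cases fuel <;> simp [show ∀ f a, PySem.Chars.count.go [c] f [] a = a from fun f a => by cases f <;> rfl]
  | cons h t ih =>
    intro fuel acc hf
    cases fuel with
    | zero => simp at hf
    | succ f =>
      rw [go_cons]
      have ht : t.length ≤ f := by simp at hf; omega
      by_cases hch : h = c
      · subst hch
        have hpre : ([h].isPrefixOf (h::t)) = true := by simp [List.isPrefixOf]
        rw [hpre, if_pos rfl, ih f (acc+1) ht, List.count_cons]
        simp; omega
      · have hpre : ([c].isPrefixOf (h::t)) = false := by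
          simp [List.isPrefixOf]; exact fun hc => (hch hc.symm).elim
        rw [hpre, if_neg (by simp), ih f acc ht, List.count_cons]
        simp [hch]

theorem str_count_single (s : String) (c : Char) :
    PySem.Str.count s (String.ofList [c]) = s.toList.count c := by
  rw [PySem.Str.count_eq]
  have h1 : (String.ofList [c]).toList = [c] := by simp
  rw [h1]
  unfold PySem.Chars.count
  rw [if_neg (by simp)]
  rw [count_go_singleton c s.toList s.toList.length 0 le_rfl]
  simp

theorem countP_contains_cons (c : Char) (cs : List Char) (l : List Char) (h : c ∉ cs) :
    l.countP (fun x => (c :: cs).contains x) = l.count c + l.countP (fun x => cs.contains x) := by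
  induction l with
  | nil => simp
  | cons x t ih =>
    rw [List.countP_cons, List.countP_cons, List.count_cons, ih]
    by_cases hx : x = c
    · subst hx
      simp [h]
      omega
    · simp [hx]
      omega

theorem foldl_count_eq (cs : List Char) : ∀ (l : List Char) (a : Int), cs.Nodup →
    cs.foldl (fun n c => n + (l.count c : Int)) a = a + (l.countP (fun x => cs.contains x) : Int) := by
  induction cs with
  | nil => intro l a _; simp
  | cons c cs ih =>
    intro l a hnd
    rw [List.foldl_cons, ih l (a + l.count c) (List.nodup_cons.mp hnd).2,
        countP_contains_cons c cs l (List.nodup_cons.mp hnd).1]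
    push_cast; ring

theorem pcount_eq (s : String) : punctuation_counter s = ((s.toList.countP pP : Nat) : Int) := by
  unfold punctuation_counter
  have hpt : ∀ (num : Int) (c : Char), num + (PySem.Str.count s (String.ofList [c]) : Int)
      = num + (s.toList.count c : Int) := by
    intro num c; rw [str_count_single]
  simp only [hpt]
  rw [foldl_count_eq _ s.toList 0 (by decide)]
  simp only [Int.zero_add]
  norm_cast

theorem cnt_mono (l : List Char) (i j : Nat) (h : i ≤ j) : cnt l i ≤ cnt l j := by
  unfold cnt
  have htt : l.take i = (l.take j).take i := by rw [List.take_take, Nat.min_eq_left h]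
  rw [htt]
  exact_mod_cast (List.take_sublist i (l.take j)).countP_le (p := pP)

theorem window_countP (l : List Char) (a b : Int) :
    ((PySem.List.slice l (some a) (some b)).countP pP : Int) =
      (if PySem.List.clampIdx l.length a ≤ PySem.List.clampIdx l.length b then
        cnt l (PySem.List.clampIdx l.length b) - cnt l (PySem.List.clampIdx l.length a) else 0) := by
  set ca := PySem.List.clampIdx l.length a with hca
  set cb := PySem.List.clampIdx l.length b with hcb
  have hslice : PySem.List.slice l (some a) (some b) = (l.take cb).drop ca := by
    simp [PySem.List.slice, List.drop_take, hca, hcb]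
  rw [hslice]
  have hsplit : (l.take cb).countP pP = ((l.take cb).take ca).countP pP + ((l.take cb).drop ca).countP pP := by
    conv_lhs => rw [← List.take_append_drop ca (l.take cb)]
    rw [List.countP_append]
  by_cases hle : ca ≤ cb
  · rw [if_pos hle]
    unfold cnt
    rw [List.take_take, Nat.min_eq_left hle] at hsplit
    omega
  · rw [if_neg hle]
    rw [List.take_take, Nat.min_eq_right (by omega)] at hsplit
    omega

theorem build_spec (l : List Char) :
    l.foldl (fun (st : List Int × Int) ch =>
      let acc := if ("()[];:!<>,.-?".toList).contains ch then st.2 + 1 else st.2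
      (st.1 ++ [acc], acc)) ([0], 0) =
    ((List.range (l.length + 1)).map (fun i => ((l.take i).countP pP : Int)), (l.countP pP : Int)) := by
  induction l using List.reverseRecOn with
  | nil => simp
  | append_singleton t c ih =>
    rw [List.foldl_append, ih]
    simp only [List.foldl_cons, List.foldl_nil]
    have hacc : (if ("()[];:!<>,.-?".toList).contains c = true then ((t.countP pP : Nat) : Int) + 1 else ((t.countP pP : Nat) : Int))
        = (((t ++ [c]).countP pP : Nat) : Int) := by
      rw [List.countP_append]
      by_cases hc : pP c
      · rw [if_pos (by simpa [pP] using hc)]; simp [hc]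
      · rw [if_neg (by simpa [pP] using hc)]; simp [hc]
    rw [hacc]
    refine Prod.ext ?_ rfl
    simp only
    have hlen : (t ++ [c]).length + 1 = (t.length + 1) + 1 := by simp
    conv_rhs => rw [hlen, List.range_succ, List.map_append]
    congr 1
    · apply List.map_congr_left
      intro i hi
      rw [List.mem_range] at hi
      rw [List.take_append_of_le_length (by omega)]
    · simp [List.take_of_length_le]

theorem pre_getD (rx : String) (i : Nat) (hi : i ≤ rx.toList.length) :
    (altPre rx).getD i 0 = cnt rx.toList i := by
  unfold altPre
  rw [build_spec]
  simp only [cnt]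
  rw [List.getD_eq_getElem?_getD, List.getElem?_map, List.getElem?_range (by omega)]
  simp

theorem clampB_eq (n : Nat) (i : Int) : clampB n i = PySem.List.clampIdx n i := by
  unfold clampB PySem.List.clampIdx; dsimp only; split_ifs <;> omega

theorem numbB_eq (rx : String) (start end_ : Int) :
    (altPre rx).getD (clampB rx.toList.length end_) 0 - (altPre rx).getD (clampB rx.toList.length start) 0
      = cnt rx.toList (PySem.List.clampIdx rx.toList.length end_)
        - cnt rx.toList (PySem.List.clampIdx rx.toList.length start) := by
  rw [clampB_eq, clampB_eq,
      pre_getD rx _ (PySem.List.clampIdx_le _ _), pre_getD rx _ (PySem.List.clampIdx_le _ _)]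

theorem loop_eq (rx : String) : ∀ (start end_ sumb : Int),
    repeatA_loop rx start end_ sumb = altLoop (altPre rx) rx.toList.length start end_ sumb := by
  intro start end_ sumb
  fun_induction repeatA_loop rx start end_ sumb with
  | case1 start end_ sumb text numb h0 => ?_
  | case2 start end_ sumb text numb h0 ih => ?_
  case case1 =>
    have hA : numb = (((PySem.List.slice rx.toList (some start) (some end_)).countP pP : Nat) : Int) := by
      show punctuation_counter (PySem.Str.slice rx (some start) (some end_)) = _
      rw [pcount_eq, PySem.Str.toList_slice]
      rfl
    have hw := window_countP rx.toList start end_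
    rw [altLoop, numbB_eq rx start end_]
    have hle : cnt rx.toList (PySem.List.clampIdx rx.toList.length end_)
        - cnt rx.toList (PySem.List.clampIdx rx.toList.length start) ≤ 0 := by
      by_cases hc : PySem.List.clampIdx rx.toList.length start ≤ PySem.List.clampIdx rx.toList.length end_
      · rw [if_pos hc] at hw; omega
      · have := cnt_mono rx.toList _ _ (le_of_not_ge hc)
        omega
    rw [if_pos hle]
    omega
  case case2 =>
    have hA : numb = (((PySem.List.slice rx.toList (some start) (some end_)).countP pP : Nat) : Int) := by
      show punctuation_counter (PySem.Str.slice rx (some start) (some end_)) = _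
      rw [pcount_eq, PySem.Str.toList_slice]
      rfl
    have hw := window_countP rx.toList start end_
    have hc : PySem.List.clampIdx rx.toList.length start ≤ PySem.List.clampIdx rx.toList.length end_ := by
      by_contra hcn
      rw [if_neg hcn] at hw
      exact h0 (by omega)
    rw [if_pos hc] at hw
    have hnb : (altPre rx).getD (clampB rx.toList.length end_) 0
        - (altPre rx).getD (clampB rx.toList.length start) 0 = numb := by
      rw [numbB_eq rx start end_]; omega
    rw [ih]
    conv_rhs => rw [altLoop]
    rw [hnb, if_neg (by omega)]

-- ===== VERDICT (by name: the statement is the Claim_ definition above) =====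
theorem repeat_find_keyinc_spec : Claim_equal_repeat_find_keyinc := by
  intro rx start end_ _
  unfold Spec_repeat_find_keyinc repeat_find_keyinc repeat_find_keyinc_alt
  rw [PySem.Str.len_eq, Int.toNat_natCast]
  exact loop_eq rx start end_ 0
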